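-- pv_equiv track=rewrite | github.com/Roll1ngo/PytoneCore_leks_and_pract_archive | Autucheck_and_HW/autocheck_M5/autocheck_05.py | get_phone_numbers_for_countries
-- ===== SOURCE A (Python) =====
-- def sanitize_phone_number(phone):
--     san_phone = (
--         phone.strip()
--         .removeprefix("+")
--         .replace("(", "")
--         .replace(")", "")
--         .replace("-", "")
--         .replace(" ", "")
--     )
--     return san_phone
--
-- def get_phone_numbers_for_countries(list_phones):
--     phones_dict = dict()
--     ua_list = []
--     jp_list = []
--     tw_list = []
--     sg_list = []
--
--
--     for phone in list_phones:
--         san_phone =sanitize_phone_number(phone)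
--         san_phone = str(san_phone)
--
--
--         if san_phone.startswith("81"):
--             jp_list.append(san_phone)
--             phones_dict["JP"] = jp_list
--
--
--         elif san_phone.startswith("65"):
--             sg_list.append(san_phone)
--             phones_dict["SG"] = sg_list
--
--         elif san_phone.startswith("886"):
--             tw_list.append(san_phone)
--             phones_dict["TW"] = tw_list
--
--         else:
--             ua_list.append(san_phone)
--             phones_dict["UA"] = ua_list
--
--
--     return phones_dict
-- ===== SOURCE B (Python) =====
-- PREFIXES = [("81", "JP"), ("65", "SG"), ("886", "TW")]
--
--
-- def sanitize_phone_number(phone):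
--     san_phone = (
--         phone.strip()
--         .removeprefix("+")
--         .replace("(", "")
--         .replace(")", "")
--         .replace("-", "")
--         .replace(" ", "")
--     )
--     return san_phone
--
--
-- def classify(number):
--     for prefix, country in PREFIXES:
--         if number.startswith(prefix):
--             return country
--     return "UA"
--
--
-- def get_phone_numbers_for_countries(list_phones):
--     # staged group-by: tag every number, fix key order by first occurrence,
--     # then build each bucket with its own filtering pass
--     tagged = [(classify(n), n) for n in (str(sanitize_phone_number(p)) for p in list_phones)]
--     order = list(dict.fromkeys(c for c, _ in tagged))
--     return {c: [n for cc, n in tagged if cc == c] for c in order}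
-- ===== Notes on version B (the rewrite author's own statement) =====
-- stated objective: alternative
-- what changed: Replaces A's single pass that hand-maintains four per-country lists and a dict updated inside an if/elif chain by a staged group-by: tag every number with its country, derive the key order by first-occurrence dedup, then build each bucket with its own filtering pass.
import Mathlib
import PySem

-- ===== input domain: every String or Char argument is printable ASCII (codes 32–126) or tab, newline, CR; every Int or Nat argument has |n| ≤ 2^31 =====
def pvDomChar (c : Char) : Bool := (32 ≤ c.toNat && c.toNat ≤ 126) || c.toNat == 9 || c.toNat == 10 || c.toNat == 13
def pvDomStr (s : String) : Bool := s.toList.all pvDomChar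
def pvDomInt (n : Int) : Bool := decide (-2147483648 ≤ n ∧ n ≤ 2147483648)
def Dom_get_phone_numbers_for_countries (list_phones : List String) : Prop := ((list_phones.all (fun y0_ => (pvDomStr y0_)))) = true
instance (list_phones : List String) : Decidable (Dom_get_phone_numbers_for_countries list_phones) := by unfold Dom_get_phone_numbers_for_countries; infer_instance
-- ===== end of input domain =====

-- B replaces A's single-pass bucket accumulation by a staged group-by
-- (tag, first-occurrence key order, per-key filtering passes) — alternative decomposition, same result.


-- ===== PORT A =====
-- shared helper, unchanged between A and B (B's Python keeps it verbatim)
def sanitize_phone_number (phone : String) : String :=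
  let s := PySem.Str.strip phone
  -- .removeprefix("+"): hand-ported (no PySem primitive); exact: drops one leading '+' if present
  let s := if PySem.Str.startswith s "+" then String.ofList (s.toList.drop 1) else s
  let s := PySem.Str.replace s "(" ""
  let s := PySem.Str.replace s ")" ""
  let s := PySem.Str.replace s "-" ""
  let s := PySem.Str.replace s " " ""
  s

-- one iteration of A's for-loop: state = (phones_dict, ua_list, jp_list, tw_list, sg_list)
def pvAStep (st : PySem.Dict String (List String) × List String × List String × List String × List String)
    (phone : String) :
    PySem.Dict String (List String) × List String × List String × List String × List String :=
  let (d, ua, jp, tw, sg) := st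
  let san := sanitize_phone_number phone   -- str(san_phone) is the identity on a str
  if PySem.Str.startswith san "81" then
    let jp := jp ++ [san]
    (d.insert "JP" jp, ua, jp, tw, sg)
  else if PySem.Str.startswith san "65" then
    let sg := sg ++ [san]
    (d.insert "SG" sg, ua, jp, tw, sg)
  else if PySem.Str.startswith san "886" then
    let tw := tw ++ [san]
    (d.insert "TW" tw, ua, jp, tw, sg)
  else
    let ua := ua ++ [san]
    (d.insert "UA" ua, ua, jp, tw, sg)

def get_phone_numbers_for_countries (list_phones : List String) : List (String × List String) :=
  (list_phones.foldl pvAStep (PySem.Dict.empty, [], [], [], [])).1.items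

-- ===== PORT B =====
def pvPREFIXES : List (String × String) := [("81", "JP"), ("65", "SG"), ("886", "TW")]

-- B's classify(): scan the table, first match wins, default "UA"
def pvClassify : List (String × String) → String → String
  | [], _ => "UA"
  | (p, c) :: rest, n => if PySem.Str.startswith n p then c else pvClassify rest n

def get_phone_numbers_for_countries_alt (list_phones : List String) : List (String × List String) :=
  let tagged := list_phones.map (fun phone =>
    let n := sanitize_phone_number phone;   -- str(...) is the identity on a str
    (pvClassify pvPREFIXES n, n))
  let order := PySem.List.dedup (tagged.map (·.1))   -- list(dict.fromkeys(...))
  order.map (fun c => (c, (tagged.filter (fun t => t.1 == c)).map (·.2)))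

-- ===== PRECONDITION & SPEC =====
def Spec_get_phone_numbers_for_countries (list_phones : List String) (out : List (String × List String)) : Prop := out = get_phone_numbers_for_countries_alt list_phones
instance (list_phones : List String) (out : List (String × List String)) : Decidable (Spec_get_phone_numbers_for_countries list_phones out) := by unfold Spec_get_phone_numbers_for_countries; infer_instance

-- ===== CLAIM (what is proved, stated in full; the proofs are below) =====
def Claim_equal_get_phone_numbers_for_countries : Prop := ∀ (list_phones : List String), Dom_get_phone_numbers_for_countries list_phones → Spec_get_phone_numbers_for_countries list_phones (get_phone_numbers_for_countries list_phones)

-- ===== LEMMAS AND PROOFS =====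

-- proof-side helpers: the tag of one phone, and the grouping fold both programs reduce to
def pvTag (phone : String) : String × String :=
  let n := sanitize_phone_number phone
  (pvClassify pvPREFIXES n, n)

def pvMStep (d : PySem.Dict String (List String)) (t : String × String) :
    PySem.Dict String (List String) :=
  d.modify t.1 [] (· ++ [t.2])

-- loop invariant: A's dict equals the grouping fold over the tagged list,
-- provided the four lists are the buckets stored in the dict
lemma loop_eq (phones : List String) (d : PySem.Dict String (List String))
    (ua jp tw sg : List String)
    (hua : ua = d.getD "UA" []) (hjp : jp = d.getD "JP" [])
    (htw : tw = d.getD "TW" []) (hsg : sg = d.getD "SG" []) :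
    (phones.foldl pvAStep (d, ua, jp, tw, sg)).1
      = (phones.map pvTag).foldl pvMStep d := by
  induction phones generalizing d ua jp tw sg with
  | nil => rfl
  | cons p rest ih =>
    simp only [List.foldl_cons, List.map_cons]
    set san := sanitize_phone_number p with hsan
    by_cases h81 : PySem.Chars.startswith san.toList ['8', '1'] = true
    · have hstep : pvAStep (d, ua, jp, tw, sg) p
          = (d.insert "JP" (jp ++ [san]), ua, jp ++ [san], tw, sg) := by
        simp [pvAStep, ← hsan, h81]
      have hbstep : pvMStep d (pvTag p) = d.insert "JP" (d.getD "JP" [] ++ [san]) := by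
        simp [pvMStep, pvTag, pvClassify, pvPREFIXES, ← hsan, h81, PySem.Dict.modify]
      rw [hstep, hbstep, ← hjp]
      exact ih _ _ _ _ _
        (by rw [hua]; simp [PySem.Dict.getD_insert])
        (by simp [PySem.Dict.getD_insert_self])
        (by rw [htw]; simp [PySem.Dict.getD_insert])
        (by rw [hsg]; simp [PySem.Dict.getD_insert])
    · by_cases h65 : PySem.Chars.startswith san.toList ['6', '5'] = true
      · have hstep : pvAStep (d, ua, jp, tw, sg) p
            = (d.insert "SG" (sg ++ [san]), ua, jp, tw, sg ++ [san]) := by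
          simp [pvAStep, ← hsan, h81, h65]
        have hbstep : pvMStep d (pvTag p) = d.insert "SG" (d.getD "SG" [] ++ [san]) := by
          simp [pvMStep, pvTag, pvClassify, pvPREFIXES, ← hsan, h81, h65, PySem.Dict.modify]
        rw [hstep, hbstep, ← hsg]
        exact ih _ _ _ _ _
          (by rw [hua]; simp [PySem.Dict.getD_insert])
          (by rw [hjp]; simp [PySem.Dict.getD_insert])
          (by rw [htw]; simp [PySem.Dict.getD_insert])
          (by simp [PySem.Dict.getD_insert_self])
      · by_cases h886 : PySem.Chars.startswith san.toList ['8', '8', '6'] = true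
        · have hstep : pvAStep (d, ua, jp, tw, sg) p
              = (d.insert "TW" (tw ++ [san]), ua, jp, tw ++ [san], sg) := by
            simp [pvAStep, ← hsan, h81, h65, h886]
          have hbstep : pvMStep d (pvTag p) = d.insert "TW" (d.getD "TW" [] ++ [san]) := by
            simp [pvMStep, pvTag, pvClassify, pvPREFIXES, ← hsan, h81, h65, h886, PySem.Dict.modify]
          rw [hstep, hbstep, ← htw]
          exact ih _ _ _ _ _
            (by rw [hua]; simp [PySem.Dict.getD_insert])
            (by rw [hjp]; simp [PySem.Dict.getD_insert])
            (by simp [PySem.Dict.getD_insert_self])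
            (by rw [hsg]; simp [PySem.Dict.getD_insert])
        · have hstep : pvAStep (d, ua, jp, tw, sg) p
              = (d.insert "UA" (ua ++ [san]), ua ++ [san], jp, tw, sg) := by
            simp [pvAStep, ← hsan, h81, h65, h886]
          have hbstep : pvMStep d (pvTag p) = d.insert "UA" (d.getD "UA" [] ++ [san]) := by
            simp [pvMStep, pvTag, pvClassify, pvPREFIXES, ← hsan, h81, h65, h886, PySem.Dict.modify]
          rw [hstep, hbstep, ← hua]
          exact ih _ _ _ _ _
            (by simp [PySem.Dict.getD_insert_self])
            (by rw [hjp]; simp [PySem.Dict.getD_insert])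
            (by rw [htw]; simp [PySem.Dict.getD_insert])
            (by rw [hsg]; simp [PySem.Dict.getD_insert])

-- the grouping fold's items ARE the staged group-by B computes
lemma items_group (ts : List (String × String)) :
    (ts.foldl pvMStep PySem.Dict.empty).items
      = (PySem.List.dedup (ts.map (·.1))).map
          (fun c => (c, (ts.filter (fun t => t.1 == c)).map (·.2))) := by
  have hfold : ts.foldl pvMStep PySem.Dict.empty
      = ts.foldl (fun d p => d.modify p.1 [] (· ++ [p.2])) PySem.Dict.empty := rfl
  have hnd : (ts.foldl (fun d p => d.modify p.1 [] (· ++ [p.2])) PySem.Dict.empty).keys.Nodup :=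
    PySem.Dict.nodup_keys_foldl_modify_key ts (·.1) [] (fun _ p => (· ++ [p.2])) PySem.Dict.empty
      (by simp)
  rw [hfold, PySem.Dict.items_eq_map_keys _ hnd []]
  have hkeys : (ts.foldl (fun d p => d.modify p.1 [] (· ++ [p.2])) PySem.Dict.empty).keys
      = PySem.List.dedup (ts.map (·.1)) := by
    rw [PySem.Dict.keys_foldl_modify_key ts (·.1) [] (fun _ p => (· ++ [p.2])) PySem.Dict.empty]
    simp [PySem.List.dedup_eq_ofList, PySem.Set.ofList, PySem.Set.update, PySem.Dict.keys_empty]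
  rw [hkeys]
  refine List.map_congr_left (fun c _ => ?_)
  rw [PySem.Dict.getD_foldl_modify_append]
  simp [PySem.Dict.getD_empty]

-- ===== VERDICT (by name: the statement is the Claim_ definition above) =====
theorem get_phone_numbers_for_countries_spec : Claim_equal_get_phone_numbers_for_countries := by
  intro l _
  unfold Spec_get_phone_numbers_for_countries get_phone_numbers_for_countries get_phone_numbers_for_countries_alt
  rw [loop_eq l PySem.Dict.empty [] [] [] [] rfl rfl rfl rfl, items_group]
  rfl
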